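-- pv_equiv track=rewrite | github.com/jayantdadhich/DSA | MI/006.Collecting_wood/main.py | find_height
-- ===== SOURCE A (Python) =====
-- def find_height(n, x, arr):
--     count = 0
--     for i in range(0,n):
--         if arr[i] == x:
--             count = 0
--
--         elif arr[i] <= x:
--             count = 0
--
--         else:
--             y = arr[i] - x
--             count = count + y
--     return count
-- ===== SOURCE B (Python) =====
-- def find_height(n, x, arr):
--     total = 0
--     for i in range(n - 1, -1, -1):
--         if arr[i] > x:
--             total += arr[i] - x
--         else:
--             break
--     return total
-- ===== Notes on version B (the rewrite author's own statement) =====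
-- stated objective: alternative
-- what changed: B scans backwards from index n-1 and stops at the first element <= x, summing the trailing run directly, instead of A's full forward pass that resets an accumulator on every element <= x.
import Mathlib
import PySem

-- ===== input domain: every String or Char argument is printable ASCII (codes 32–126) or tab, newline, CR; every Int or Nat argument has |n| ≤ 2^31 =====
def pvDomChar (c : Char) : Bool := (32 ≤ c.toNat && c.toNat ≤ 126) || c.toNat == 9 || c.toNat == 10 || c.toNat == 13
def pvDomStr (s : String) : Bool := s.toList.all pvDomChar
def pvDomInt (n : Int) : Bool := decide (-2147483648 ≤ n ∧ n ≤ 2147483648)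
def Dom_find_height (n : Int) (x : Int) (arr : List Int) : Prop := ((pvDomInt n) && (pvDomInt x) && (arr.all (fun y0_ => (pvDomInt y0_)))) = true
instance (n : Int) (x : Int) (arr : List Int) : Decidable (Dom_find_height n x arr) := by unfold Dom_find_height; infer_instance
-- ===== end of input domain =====

-- B scans backwards from index n-1 and stops at the first element <= x, summing the trailing
-- run directly, instead of A's forward pass resetting an accumulator (alternative decomposition).


-- ===== PORT A =====
-- for i in range(0, n): resets count on arr[i] <= x (incl. ==), else adds arr[i]-x.
-- pyGetD is exact under Pre_ (every index 0 ≤ i < n is in range).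
def find_height (n : Int) (x : Int) (arr : List Int) : Int :=
  (PySem.List.pyRange 0 n 1).foldl (fun count i =>
    if PySem.List.pyGetD arr i 0 = x then 0
    else if PySem.List.pyGetD arr i 0 ≤ x then 0
    else count + (PySem.List.pyGetD arr i 0 - x)) 0

-- ===== PORT B =====
-- for i in range(n-1, -1, -1): accumulate while arr[i] > x, break at first arr[i] <= x.
def find_height_altGo (x : Int) (arr : List Int) (idxs : List Int) (total : Int) : Int :=
  match idxs with
  | [] => total
  | i :: rest =>
    if x < PySem.List.pyGetD arr i 0
    then find_height_altGo x arr rest (total + (PySem.List.pyGetD arr i 0 - x))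
    else total

def find_height_alt (n : Int) (x : Int) (arr : List Int) : Int :=
  find_height_altGo x arr (PySem.List.pyRange (n - 1) (-1) (-1)) 0

-- ===== PRECONDITION & SPEC =====
-- Pre_ excludes exactly the inputs where Python A raises IndexError: n > len(arr).
def Pre_find_height (n : Int) (x : Int) (arr : List Int) : Prop := n ≤ (arr.length : Int)
instance (n : Int) (x : Int) (arr : List Int) : Decidable (Pre_find_height n x arr) := by unfold Pre_find_height; infer_instance
def pvWitness_find_height : Int × Int × List Int := (3, 2, [1, 5, 4])
def Spec_find_height (n : Int) (x : Int) (arr : List Int) (out : Int) : Prop := out = find_height_alt n x arr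
instance (n : Int) (x : Int) (arr : List Int) (out : Int) : Decidable (Spec_find_height n x arr out) := by unfold Spec_find_height; infer_instance

-- ===== CLAIM (what is proved, stated in full; the proofs are below) =====
def Claim_equal_find_height : Prop := ∀ (n : Int) (x : Int) (arr : List Int), Dom_find_height n x arr → Pre_find_height n x arr → Spec_find_height n x arr (find_height n x arr)

-- ===== LEMMAS AND PROOFS =====

-- Sum of the leading run of elements > x (used on reversed prefixes as the common spec).
def pvSumRun (x : Int) : List Int → Int
  | [] => 0
  | a :: t => if x < a then (a - x) + pvSumRun x t else 0

-- A's fold over a value list equals the trailing-run sum.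
theorem pvFoldA_eq_sumRun (x : Int) (l : List Int) :
    l.foldl (fun count a => if a = x then 0 else if a ≤ x then 0 else count + (a - x)) 0
      = pvSumRun x l.reverse := by
  induction l using List.reverseRecOn with
  | nil => rfl
  | append_singleton l a ih =>
    rw [List.foldl_append, List.reverse_append]
    simp only [List.foldl_cons, List.foldl_nil, List.reverse_cons, List.reverse_nil,
      List.nil_append, List.singleton_append, pvSumRun]
    by_cases h1 : a = x
    · simp [h1, pvSumRun]
    · by_cases h2 : a ≤ x
      · simp [h1, h2, lt_iff_le_and_ne]
      · have hx : x < a := by omega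
        simp [h1, h2, hx, ih]
        omega

-- B's descending loop accumulates the same trailing-run sum (break = stop of pvSumRun).
theorem pvAltGo_eq (x : Int) (arr : List Int) (m : Nat) (hm : m ≤ arr.length) (t : Int) :
    find_height_altGo x arr (PySem.List.pyRange ((m : Int) - 1) (-1) (-1)) t
      = t + pvSumRun x (arr.take m).reverse := by
  induction m generalizing t with
  | zero => simp [PySem.List.pyRange_neg_one_eq_nil, find_height_altGo, pvSumRun]
  | succ k ih =>
    have hk : k < arr.length := by omega
    have hcons : PySem.List.pyRange ((k + 1 : Nat) - 1 : Int) (-1) (-1)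
        = (k : Int) :: PySem.List.pyRange ((k : Int) - 1) (-1) (-1) := by
      have : ((k + 1 : Nat) : Int) - 1 = (k : Int) := by push_cast; ring
      rw [this, PySem.List.pyRange_neg_one_cons (by omega)]
    rw [hcons]
    have hget : PySem.List.pyGetD arr (k : Int) 0 = arr[k] := by
      rw [PySem.List.pyGetD_eq_getElem arr 0 (by omega) (by exact_mod_cast hk)]
      simp
    have htake : (arr.take (k + 1)).reverse = arr[k] :: (arr.take k).reverse := by
      rw [List.take_succ, List.getElem?_eq_getElem hk]
      simp
    simp only [find_height_altGo, hget, htake, pvSumRun]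
    by_cases h : x < arr[k]
    · simp only [if_pos h, ih (by omega)]
      ring
    · simp only [if_neg h]
      omega

-- ===== VERDICT (by name: the statement is the Claim_ definition above) =====
theorem find_height_spec : Claim_equal_find_height := by
  intro n x arr _ hpre
  unfold Spec_find_height find_height find_height_alt
  by_cases hn : n ≤ 0
  · rw [PySem.List.pyRange_one_eq_nil hn, PySem.List.pyRange_neg_one_eq_nil (by omega)]
    rfl
  · have hn0 : 0 ≤ n := by omega
    have hlen : n.toNat ≤ arr.length := by
      unfold Pre_find_height at hpre; omega
    have hcast : n = ((n.toNat : Int)) := by omega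
    -- A side: indices read from arr agree with reads from arr.take n.toNat
    have hcong : (PySem.List.pyRange 0 n 1).foldl (fun count i =>
        if PySem.List.pyGetD arr i 0 = x then 0
        else if PySem.List.pyGetD arr i 0 ≤ x then 0
        else count + (PySem.List.pyGetD arr i 0 - x)) 0
      = (PySem.List.pyRange 0 ((arr.take n.toNat).length : Int) 1).foldl (fun count i =>
        if PySem.List.pyGetD (arr.take n.toNat) i 0 = x then 0
        else if PySem.List.pyGetD (arr.take n.toNat) i 0 ≤ x then 0
        else count + (PySem.List.pyGetD (arr.take n.toNat) i 0 - x)) 0 := by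
      have hlen' : ((arr.take n.toNat).length : Int) = n := by
        rw [List.length_take]; omega
      rw [hlen']
      refine PySem.List.foldl_congr_mem _ _ _ _ ?_
      intro acc i hi
      have hmem := (PySem.List.mem_pyRange_one).mp hi
      have hget : PySem.List.pyGetD (arr.take n.toNat) i 0 = PySem.List.pyGetD arr i 0 := by
        rw [PySem.List.pyGetD_eq_getElem (arr.take n.toNat) 0 hmem.1
            (by rw [List.length_take]; push_cast; omega),
          PySem.List.pyGetD_eq_getElem arr 0 hmem.1 (by push_cast; omega)]
        rw [List.getElem_take]
      simp only [hget]
    rw [hcong]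
    have hfold := PySem.List.foldl_pyRange_zero_pyGetD' (arr.take n.toNat) (0 : Int)
      (fun count a => if a = x then 0 else if a ≤ x then 0 else count + (a - x)) 0
    simp only [] at hfold
    rw [hfold, pvFoldA_eq_sumRun]
    rw [hcast, pvAltGo_eq x arr n.toNat hlen 0]
    simp
    rw [show max n 0 = n from by omega]
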